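-- pv_equiv track=rewrite | github.com/NagyAttila/tempeh_project | regulator.py | is_monotonly_decreasing
-- ===== SOURCE A (Python) =====
-- MEAN_DHT11_TEMPERATURE_HIST_SIZE_MAX = 15
--
-- def is_monotonly_decreasing(xs):
--     if len(xs) != MEAN_DHT11_TEMPERATURE_HIST_SIZE_MAX:
--         return False
--
--     prev = xs[0]
--     monotonly_decreasing = True
--     for x in xs:
--         if x > prev:
--            monotonly_decreasing = False
--         prev = x
--     return monotonly_decreasing
-- ===== SOURCE B (Python) =====
-- MEAN_DHT11_TEMPERATURE_HIST_SIZE_MAX = 15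
--
-- def is_monotonly_decreasing(xs):
--     if len(xs) != MEAN_DHT11_TEMPERATURE_HIST_SIZE_MAX:
--         return False
--     return xs == sorted(xs, reverse=True)
-- ===== Notes on version B (the rewrite author's own statement) =====
-- stated objective: idiomatic
-- what changed: Replaced the prev-tracking flag loop with a sort-then-compare: after the length-15 guard, B returns xs == sorted(xs, reverse=True).
import Mathlib
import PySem

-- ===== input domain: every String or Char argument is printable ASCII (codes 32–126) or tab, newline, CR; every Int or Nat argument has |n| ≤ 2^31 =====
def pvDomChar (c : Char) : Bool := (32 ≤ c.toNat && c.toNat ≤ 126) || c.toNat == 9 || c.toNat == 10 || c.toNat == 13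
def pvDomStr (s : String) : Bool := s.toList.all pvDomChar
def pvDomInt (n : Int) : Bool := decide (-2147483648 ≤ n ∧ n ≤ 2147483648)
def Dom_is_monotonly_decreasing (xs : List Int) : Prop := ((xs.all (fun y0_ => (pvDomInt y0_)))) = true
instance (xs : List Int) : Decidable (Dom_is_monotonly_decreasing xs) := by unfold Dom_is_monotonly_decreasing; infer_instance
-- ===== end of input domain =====

-- B replaces A's prev-tracking flag loop by a sort-then-compare (xs == sorted(xs, reverse=True)); objective: idiomatic.

-- ===== PORT A =====
def is_monotonly_decreasing (xs : List Int) : Bool :=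
  if xs.length ≠ 15 then false
  else
    match PySem.List.pyGet? xs 0 with
    | none => false   -- unreachable: length = 15, xs[0] cannot raise
    | some p0 =>
      (xs.foldl (fun (st : Int × Bool) x => (x, if x > st.1 then false else st.2)) (p0, true)).2

-- ===== PORT B =====
def is_monotonly_decreasing_alt (xs : List Int) : Bool :=
  if xs.length ≠ 15 then false
  else decide (xs = PySem.List.sorted xs (fun x => x) true)

-- ===== PRECONDITION & SPEC =====
def Spec_is_monotonly_decreasing (xs : List Int) (out : Bool) : Prop := out = is_monotonly_decreasing_alt xs
instance (xs : List Int) (out : Bool) : Decidable (Spec_is_monotonly_decreasing xs out) := by unfold Spec_is_monotonly_decreasing; infer_instance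

-- ===== CLAIM (what is proved, stated in full; the proofs are below) =====
def Claim_equal_is_monotonly_decreasing : Prop := ∀ (xs : List Int), Dom_is_monotonly_decreasing xs → Spec_is_monotonly_decreasing xs (is_monotonly_decreasing xs)

-- ===== LEMMAS AND PROOFS =====

-- "p followed by l is step-wise non-increasing", as A's loop checks it
def pvDesc : Int → List Int → Bool
  | _, [] => true
  | p, x :: t => decide (x ≤ p) && pvDesc x t

-- A's loop flag: starting from (p, b), the final flag is b && pvDesc p l
theorem pvFoldFlag (l : List Int) (p : Int) (b : Bool) :
    (l.foldl (fun (st : Int × Bool) x => (x, if x > st.1 then false else st.2)) (p, b)).2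
      = (b && pvDesc p l) := by
  induction l generalizing p b with
  | nil => simp [pvDesc]
  | cons x t ih =>
    simp only [List.foldl_cons, ih, pvDesc]
    by_cases h : x > p
    · simp [h, show ¬ (x ≤ p) by omega]
    · simp [h, show x ≤ p by omega]

-- the step-wise check equals full pairwise non-increase (transitivity)
theorem pvDesc_pairwise (t : List Int) (h : Int) :
    pvDesc h t = true ↔ (h :: t).Pairwise (fun a b => b ≤ a) := by
  induction t generalizing h with
  | nil => simp [pvDesc]
  | cons x t ih =>
    simp only [pvDesc, Bool.and_eq_true, decide_eq_true_eq, ih]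
    constructor
    · rintro ⟨hxh, hp⟩
      refine List.pairwise_cons.mpr ⟨?_, hp⟩
      intro y hy
      rcases List.mem_cons.mp hy with rfl | hyt
      · exact hxh
      · exact le_trans (List.rel_of_pairwise_cons hp hyt) hxh
    · intro hp
      rcases List.pairwise_cons.mp hp with ⟨hall, hp'⟩
      exact ⟨hall x (by simp), hp'⟩

-- ===== VERDICT (by name: the statement is the Claim_ definition above) =====
theorem is_monotonly_decreasing_spec : Claim_equal_is_monotonly_decreasing := by
  intro xs _
  unfold Spec_is_monotonly_decreasing is_monotonly_decreasing is_monotonly_decreasing_alt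
  by_cases hlen : xs.length = 15
  · cases xs with
    | nil => simp at hlen
    | cons h t =>
      simp only [hlen, ne_eq, not_true_eq_false, if_false]
      have h0 : PySem.List.pyGet? (h :: t) 0 = some h := by
        simp [PySem.List.pyGet?, PySem.List.pyIdx?]
      rw [h0]
      simp only [pvFoldFlag, pvDesc, Bool.true_and,
        show decide (h ≤ h) = true by simp]
      by_cases hc : pvDesc h t = true
      · have hp : (h :: t).Pairwise (fun a b => b ≤ a) := (pvDesc_pairwise t h).mp hc
        have := PySem.List.sorted_rev_eq_self_of_pairwise (h :: t) (fun x => x) hp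
        simp [hc, this]
      · have hne : ¬ (h :: t = PySem.List.sorted (h :: t) (fun x => x) true) := by
          intro he
          apply hc
          apply (pvDesc_pairwise t h).mpr
          have := PySem.List.sorted_pairwise_rev (h :: t) (fun x => x)
          rw [← he] at this
          simpa using this
        simp [Bool.eq_false_iff.mpr hc, hne]
  · simp [hlen]
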